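-- pv_equiv track=rewrite | github.com/egorjke93/network-automatisation | core/constants/interfaces.py | is_lag_name
-- ===== SOURCE A (Python) =====
-- _LAG_LONG_PREFIXES = ("port-channel", "aggregateport")
--
-- _LAG_SHORT_PREFIXES = ("po", "ag")
--
-- def is_lag_name(interface: str) -> bool:
--     """
--     Проверяет, является ли интерфейс LAG по имени.
--
--     Поддерживает все форматы: Port-channel1, Po1, AggregatePort 1, Ag1.
--     Использует LAG_PREFIXES как единый источник.
--
--     Args:
--         interface: Имя интерфейса в любом регистре
--
--     Returns:
--         bool: True если это LAG-интерфейс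
--     """
--     if not interface:
--         return False
--     iface_lower = interface.lower().replace(" ", "")
--     # Длинные префиксы — простой startswith
--     if iface_lower.startswith(_LAG_LONG_PREFIXES):
--         return True
--     # Короткие (po, ag) — после них должна быть цифра
--     for prefix in _LAG_SHORT_PREFIXES:
--         if (iface_lower.startswith(prefix)
--                 and len(iface_lower) > len(prefix)
--                 and iface_lower[len(prefix)].isdigit()):
--             return True
--     return False
-- ===== SOURCE B (Python) =====
-- # '#' in a pattern stands for "any digit" (str.isdigit semantics)
-- _LAG_PATTERNS = ("port-channel", "aggregateport", "po#", "ag#")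
--
--
-- def _matches_prefix(text, pat):
--     if len(text) < len(pat):
--         return False
--     return all(c.isdigit() if p == "#" else c == p for p, c in zip(pat, text))
--
--
-- def is_lag_name(interface: str) -> bool:
--     t = interface.lower().replace(" ", "")
--     return any(_matches_prefix(t, p) for p in _LAG_PATTERNS)
-- ===== Notes on version B (the rewrite author's own statement) =====
-- stated objective: simpler
-- what changed: Replaces the empty-string guard, the tuple-startswith test and the per-prefix digit loop with one uniform table-driven matcher: every rule is a pattern whose wildcard position must hold a digit, checked by a single zip-based prefix comparison.
import Mathlib
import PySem

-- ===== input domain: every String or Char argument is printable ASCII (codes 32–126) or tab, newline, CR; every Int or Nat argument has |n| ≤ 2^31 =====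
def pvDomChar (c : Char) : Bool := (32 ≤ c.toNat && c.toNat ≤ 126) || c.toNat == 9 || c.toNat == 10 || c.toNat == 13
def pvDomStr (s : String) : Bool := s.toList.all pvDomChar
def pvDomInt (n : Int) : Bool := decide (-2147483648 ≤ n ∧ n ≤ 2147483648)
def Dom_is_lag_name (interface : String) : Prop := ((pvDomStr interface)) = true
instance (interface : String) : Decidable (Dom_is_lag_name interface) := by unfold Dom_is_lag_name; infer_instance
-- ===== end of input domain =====

-- B replaces A's empty-guard + tuple-startswith + per-prefix digit loop by one uniform
-- '#'-wildcard pattern table checked with a single zip-based prefix matcher (simpler).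

-- ===== PORT A =====
def is_lag_name (interface : String) : Bool :=
  if interface = "" then false
  else
    let il := PySem.Str.replace (PySem.Str.lower interface) " " ""
    if PySem.Str.startswith il "port-channel" || PySem.Str.startswith il "aggregateport" then
      true
    else
      ["po", "ag"].foldl
        (fun acc p =>
          acc || (PySem.Str.startswith il p
                  && decide (PySem.Str.len p < PySem.Str.len il)
                  && ((PySem.Str.pyGet? il (PySem.Str.len p)).map PySem.Chars.isdigit).getD false))
        false

-- ===== PORT B =====
def pvMatchPrefix (text : List Char) (pat : List Char) : Bool :=
  if text.length < pat.length then false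
  else (pat.zip text).all (fun pc => if pc.1 = '#' then PySem.Chars.isdigit pc.2 else pc.2 == pc.1)

def is_lag_name_alt (interface : String) : Bool :=
  let t := (PySem.Str.replace (PySem.Str.lower interface) " " "").toList
  ["port-channel", "aggregateport", "po#", "ag#"].any (fun p => pvMatchPrefix t p.toList)

-- ===== PRECONDITION & SPEC =====
def Spec_is_lag_name (interface : String) (out : Bool) : Prop := out = is_lag_name_alt interface
instance (interface : String) (out : Bool) : Decidable (Spec_is_lag_name interface out) := by unfold Spec_is_lag_name; infer_instance

-- ===== CLAIM (what is proved, stated in full; the proofs are below) =====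
def Claim_equal_is_lag_name : Prop := ∀ (interface : String), Dom_is_lag_name interface → Spec_is_lag_name interface (is_lag_name interface)

-- ===== LEMMAS AND PROOFS =====

-- a pattern with no '#' matches iff it is a list prefix
theorem pvMatchPrefix_pure (p t : List Char) (h : '#' ∉ p) :
    pvMatchPrefix t p = p.isPrefixOf t := by
  induction p generalizing t with
  | nil => simp [pvMatchPrefix]
  | cons a p ih =>
    cases t with
    | nil => simp [pvMatchPrefix]
    | cons b t =>
      simp only [List.mem_cons, not_or] at h
      have ha : ¬ a = '#' := fun e => h.1 e.symm
      have := ih t h.2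
      simp only [pvMatchPrefix] at this ⊢
      simp only [List.zip_cons_cons, List.all_cons, ha, List.length_cons,
        Nat.add_lt_add_iff_right, List.isPrefixOf] at *
      by_cases hba : a = b
      · subst hba
        cases hd : decide (t.length < p.length) <;> simp_all [Bool.and_comm]
      · have hb1 : (b == a) = false := beq_eq_false_iff_ne.mpr (fun e => hba e.symm)
        have hb2 : (a == b) = false := beq_eq_false_iff_ne.mpr hba
        simp [hb1, hb2]

-- a '#'-terminated pattern matches iff its pure part is a prefix followed by a digit
theorem pvMatchPrefix_hash (p t : List Char) (h : '#' ∉ p) :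
    pvMatchPrefix t (p ++ ['#'])
      = (p.isPrefixOf t && decide (p.length < t.length)
         && (t[p.length]?.map PySem.Chars.isdigit).getD false) := by
  induction p generalizing t with
  | nil =>
    cases t with
    | nil => simp [pvMatchPrefix]
    | cons b t => simp [pvMatchPrefix]
  | cons a p ih =>
    cases t with
    | nil => simp [pvMatchPrefix]
    | cons b t =>
      simp only [List.mem_cons, not_or] at h
      have ha : ¬ a = '#' := fun e => h.1 e.symm
      have := ih t h.2
      simp only [List.cons_append, pvMatchPrefix, List.zip_cons_cons, List.all_cons,
        List.length_cons, List.length_append, Nat.add_lt_add_iff_right,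
        List.isPrefixOf, List.getElem?_cons_succ] at *
      by_cases hba : a = b
      · subst hba
        simp_all
      · have hb1 : (b == a) = false := beq_eq_false_iff_ne.mpr (fun e => hba e.symm)
        have hb2 : (a == b) = false := beq_eq_false_iff_ne.mpr hba
        simp [hb1, hb2, ha]

theorem startswith_eq_isPrefixOf (s p : String) :
    PySem.Str.startswith s p = p.toList.isPrefixOf s.toList := by
  rw [Bool.eq_iff_iff]
  simp [PySem.Chars.startswith_iff, List.isPrefixOf_iff_prefix]

-- A's branchy body equals B's pattern scan, on the shared normalized string
theorem pv_core (il : String) :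
    (if PySem.Str.startswith il "port-channel" || PySem.Str.startswith il "aggregateport" then
      true
    else
      ["po", "ag"].foldl
        (fun acc p =>
          acc || (PySem.Str.startswith il p
                  && decide (PySem.Str.len p < PySem.Str.len il)
                  && ((PySem.Str.pyGet? il (PySem.Str.len p)).map PySem.Chars.isdigit).getD false))
        false)
    = ["port-channel", "aggregateport", "po#", "ag#"].any (fun p => pvMatchPrefix il.toList p.toList) := by
  have h1 : '#' ∉ "port-channel".toList := by decide
  have h2 : '#' ∉ "aggregateport".toList := by decide
  have h3 : '#' ∉ "po".toList := by decide
  have h4 : '#' ∉ "ag".toList := by decide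
  have e3 : ("po#".toList) = "po".toList ++ ['#'] := by decide
  have e4 : ("ag#".toList) = "ag".toList ++ ['#'] := by decide
  simp only [List.any_cons, List.any_nil, List.foldl, Bool.false_or, Bool.or_false,
    e3, e4, pvMatchPrefix_pure _ _ h1, pvMatchPrefix_pure _ _ h2,
    pvMatchPrefix_hash _ _ h3, pvMatchPrefix_hash _ _ h4,
    startswith_eq_isPrefixOf]
  simp only [PySem.Str.len, PySem.Str.pyGet?_natCast]
  simp only [Nat.cast_lt]
  cases hA : "port-channel".toList.isPrefixOf il.toList <;>
    cases hB : "aggregateport".toList.isPrefixOf il.toList <;> simp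

-- ===== VERDICT (by name: the statement is the Claim_ definition above) =====
theorem is_lag_name_spec : Claim_equal_is_lag_name := by
  intro s _
  unfold Spec_is_lag_name
  by_cases hs : s = ""
  · subst hs; decide
  · simp only [is_lag_name, is_lag_name_alt, if_neg hs]
    exact pv_core _
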